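-- pv_equiv track=rewrite | github.com/meli1022/CP164-Assignments | CP164 Assignments/pint7880_a01/src/functions.py | matrix_rotate_right
-- ===== SOURCE A (Python) =====
-- def matrix_rotate_right(a):
--     """
--     -------------------------------------------------------
--     Returns a copy of a 2D arix rotated to the right.
--     a must be unchanged.
--     Use: b = arix_rotate_right(a)
--     -------------------------------------------------------
--     Parameters:
--         a - a 2D list of values (2d list of int/float)
--     Returns:
--         b - the rotated 2D list of values (2D list of int/float)
--     -------------------------------------------------------
--     """
--
--     row = len(a)
--     col = len(a[0])
--     b = []
--
--     for i in range(col):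
--         b.append([])
--         for x in range(row):
--             b[i].append(0)
--     for i in range(row):
--         for x in range(col):
--             newrow = row - i -1
--             b[x][newrow] = a [i][x]
--
--     return b
-- ===== SOURCE B (Python) =====
-- def matrix_rotate_right(a):
--     # Fold over the rows: each row of a is prepended element-wise as a new
--     # first column of the accumulator, so the last row ends up as the first
--     # column of the result (no preallocation, no index arithmetic).
--     b = [[] for _ in a[0]]
--     for r in a:
--         b = [[v] + c for v, c in zip(r, b)]
--     return b
-- ===== Notes on version B (the rewrite author's own statement) =====
-- stated objective: alternative
-- what changed: replaces A's preallocate-a-zero-matrix-then-index-map double loop (b[x][row-1-i]=a[i][x]) by a single fold over the rows that needs no index arithmetic: each input row is prepended element-wise as a new first column of the accumulator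
import Mathlib
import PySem

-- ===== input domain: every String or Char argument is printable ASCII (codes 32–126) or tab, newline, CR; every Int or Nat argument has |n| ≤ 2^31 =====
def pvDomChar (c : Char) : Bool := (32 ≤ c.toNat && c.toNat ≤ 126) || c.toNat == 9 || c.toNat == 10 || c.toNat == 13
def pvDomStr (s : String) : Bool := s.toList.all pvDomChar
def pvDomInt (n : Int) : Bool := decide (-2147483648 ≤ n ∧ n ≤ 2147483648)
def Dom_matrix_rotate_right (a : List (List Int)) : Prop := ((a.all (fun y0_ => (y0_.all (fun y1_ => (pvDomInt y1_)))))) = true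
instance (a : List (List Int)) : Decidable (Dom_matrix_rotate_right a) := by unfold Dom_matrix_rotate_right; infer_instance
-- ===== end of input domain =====

-- B replaces A's preallocate-a-zero-matrix-then-index-map double loop by a single fold over the
-- rows that grows each output row by prepending (each input row becomes a new first column);
-- equivalence is proved on the inputs where A returns (Pre_ below).

-- ===== PORT A =====
def matrix_rotate_right (a : List (List Int)) : List (List Int) :=
  let row : Int := a.length
  let col : Int := (PySem.List.pyGetD a 0 []).length  -- len(a[0]); a = [] raises IndexError, excluded by Pre_
  let b : List (List Int) :=
    (PySem.List.pyRange 0 col 1).foldl (fun b _ =>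
      b ++ [(PySem.List.pyRange 0 row 1).foldl (fun r _ => r ++ [(0 : Int)]) []]) []
  (PySem.List.pyRange 0 row 1).foldl (fun b i =>
    (PySem.List.pyRange 0 col 1).foldl (fun b x =>
      let newrow : Int := row - i - 1
      -- b[x][newrow] = a[i][x]: under Pre_ every index here is nonnegative and in range
      -- (b is col rows of length row, x < col, 0 ≤ newrow < row), so modify/set is exact;
      -- a[i][x] raises exactly when x ≥ len(a[i]), which Pre_ excludes
      b.modify x.toNat (fun r => r.set newrow.toNat
        (PySem.List.pyGetD (PySem.List.pyGetD a i []) x 0))) b) b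

-- ===== PORT B =====
def matrix_rotate_right_alt (a : List (List Int)) : List (List Int) :=
  -- b = [[] for _ in a[0]] (a[0] raises IndexError on a = [], excluded by Pre_);
  -- then for each row r: b = [[v] + c for v, c in zip(r, b)] (zip truncates to the shorter list)
  let b0 : List (List Int) := (PySem.List.pyGetD a 0 []).map (fun _ => [])
  a.foldl (fun b r => (r.zip b).map (fun p => p.1 :: p.2)) b0

-- ===== PRECONDITION & SPEC =====
-- Pre_ holds exactly where the Python A returns normally: a nonempty list whose rows are all
-- at least as long as the first row (otherwise len(a[0]) or a[i][x] raises IndexError).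
def Pre_matrix_rotate_right (a : List (List Int)) : Prop :=
  a ≠ [] ∧ ∀ r ∈ a, (a.headD []).length ≤ r.length
instance (a : List (List Int)) : Decidable (Pre_matrix_rotate_right a) := by
  unfold Pre_matrix_rotate_right; infer_instance
def pvWitness_matrix_rotate_right : List (List Int) := [[1, 2], [3, 4]]

def Spec_matrix_rotate_right (a : List (List Int)) (out : List (List Int)) : Prop :=
  out = matrix_rotate_right_alt a
instance (a : List (List Int)) (out : List (List Int)) : Decidable (Spec_matrix_rotate_right a out) := by
  unfold Spec_matrix_rotate_right; infer_instance

-- ===== CLAIM (what is proved, stated in full; the proofs are below) =====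
def Claim_equal_matrix_rotate_right : Prop :=
  ∀ (a : List (List Int)), Dom_matrix_rotate_right a → Pre_matrix_rotate_right a →
    Spec_matrix_rotate_right a (matrix_rotate_right a)
-- ===== LEMMAS AND PROOFS =====

-- the common description of the rotated matrix: column x of the result lists column x of a bottom-up
def pvRot (a : List (List Int)) : List (List Int) :=
  (List.range (a.headD []).length).map (fun x =>
    (List.range a.length).map (fun j => (a.getD (a.length - 1 - j) []).getD x 0))

-- ---- generic loop lemmas ----

theorem pv_foldl_modify_getElem? (F : Nat → List Int → List Int) :
    ∀ (l : List Nat), l.Nodup → ∀ (b : List (List Int)) (k : Nat),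
      (l.foldl (fun b x => b.modify x (F x)) b)[k]? =
        if k ∈ l then (b[k]?).map (F k) else b[k]? := by
  intro l
  induction l with
  | nil => intro _ b k; simp
  | cons x l ih =>
    intro hnd b k
    have hnd' := (List.nodup_cons.mp hnd)
    rw [List.foldl_cons, ih hnd'.2]
    by_cases hk : k ∈ l
    · have hkx : k ≠ x := fun h => hnd'.1 (h ▸ hk)
      simp [hk, hkx, List.getElem?_modify, Ne.symm hkx]
    · by_cases hkx : k = x
      · subst hkx; simp [hk, List.getElem?_modify]
      · have hxk : x ≠ k := fun h => hkx h.symm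
        have hmem : k ∉ x :: l := by simp [hkx, hk]
        simp [hmem, hk, List.getElem?_modify, hxk]

theorem pv_foldl_set_length (v : Nat → Int) (m : Nat) :
    ∀ (n : Nat) (r0 : List Int),
      ((List.range n).foldl (fun r i => r.set (m - 1 - i) (v i)) r0).length = r0.length := by
  intro n
  induction n with
  | zero => intro r0; rfl
  | succ n ih => intro r0; rw [List.range_succ, List.foldl_append]; simp [ih]

theorem pv_foldl_set_getElem? (v : Nat → Int) (m : Nat) :
    ∀ (n : Nat) (r0 : List Int), r0.length = m → n ≤ m → ∀ (k : Nat),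
      ((List.range n).foldl (fun r i => r.set (m - 1 - i) (v i)) r0)[k]? =
        if m - n ≤ k ∧ k < m then some (v (m - 1 - k)) else r0[k]? := by
  intro n
  induction n with
  | zero =>
    intro r0 hlen _ k
    have : ¬ (m - 0 ≤ k ∧ k < m) := by omega
    simp [this]
  | succ n ih =>
    intro r0 hlen hn k
    rw [List.range_succ, List.foldl_append]
    simp only [List.foldl_cons, List.foldl_nil]
    rw [List.getElem?_set]
    have hlen' : ((List.range n).foldl (fun r i => r.set (m - 1 - i) (v i)) r0).length = m := by
      rw [pv_foldl_set_length]; exact hlen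
    by_cases hk : m - 1 - n = k
    · have h1 : k < m := by omega
      have h2 : m - (n + 1) ≤ k ∧ k < m := by omega
      have h3 : m - 1 - k = n := by omega
      simp [hk, hlen', h1, h2, h3]
    · rw [if_neg hk, ih r0 hlen (by omega) k]
      by_cases h1 : m - (n + 1) ≤ k ∧ k < m
      · have h2 : m - n ≤ k ∧ k < m := by omega
        rw [if_pos h2, if_pos h1]
      · have h2 : ¬ (m - n ≤ k ∧ k < m) := by omega
        rw [if_neg h2, if_neg h1]

-- ---- A-side: the double loop computes pvRot ----

theorem pv_colfold_eq (a : List (List Int)) (x : Nat) :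
    (List.range a.length).foldl
        (fun r i => r.set (a.length - 1 - i) ((a.getD i []).getD x 0))
        (List.replicate a.length 0) =
      (List.range a.length).map (fun j => (a.getD (a.length - 1 - j) []).getD x 0) := by
  apply List.ext_getElem?
  intro k
  rw [pv_foldl_set_getElem? (fun i => (a.getD i []).getD x 0) a.length a.length
        (List.replicate a.length 0) (by simp) (le_refl _) k]
  by_cases hk : k < a.length
  · have : a.length - a.length ≤ k ∧ k < a.length := by omega
    simp [this, hk]
  · have : ¬ (a.length - a.length ≤ k ∧ k < a.length) := by omega
    simp [this, List.getElem?_eq_none, hk, List.getElem?_replicate, Nat.not_lt.mp hk]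

theorem pv_outer_inv (a : List (List Int)) (c : Nat) :
    ∀ (k : Nat),
      ((List.range k).foldl (fun b i =>
          (List.range c).foldl (fun b x =>
            b.modify x (fun r => r.set (a.length - 1 - i) ((a.getD i []).getD x 0))) b)
        (List.replicate c (List.replicate a.length 0))) =
      (List.range c).map (fun x =>
        (List.range k).foldl (fun r i => r.set (a.length - 1 - i) ((a.getD i []).getD x 0))
          (List.replicate a.length 0)) := by
  intro k
  induction k with
  | zero =>
    simp [List.map_const']
  | succ k ih =>
    rw [List.range_succ, List.foldl_append]
    simp only [List.foldl_cons, List.foldl_nil]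
    rw [ih]
    apply List.ext_getElem?
    intro j
    rw [pv_foldl_modify_getElem?
          (fun x r => r.set (a.length - 1 - k) ((a.getD k []).getD x 0))
          (List.range c) List.nodup_range]
    by_cases hj : j < c
    · have hjm : j ∈ List.range c := List.mem_range.mpr hj
      simp only [hjm, if_pos]
      rw [List.getElem?_map, List.getElem?_map]
      simp [List.getElem?_range, hj, List.range_succ, List.foldl_append]
    · have hjm : j ∉ List.range c := by simp [List.mem_range, hj]
      simp only [hjm, if_neg, not_false_iff]
      rw [List.getElem?_map, List.getElem?_map]
      simp [List.getElem?_eq_none, hj, Nat.not_lt.mp hj]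

theorem pv_key {α : Type} (n : Nat) (F : α → Int → α) (G : α → Nat → α) (b : α)
    (h : ∀ (b : α) (k : Nat), k < n → F b ((0 : Int) + (k : Int)) = G b k) :
    (PySem.List.pyRange 0 (n : Int) 1).foldl F b = (List.range n).foldl G b := by
  rw [PySem.List.pyRange_one]
  simp only [Int.sub_zero, Int.toNat_natCast]
  rw [List.foldl_map]
  exact PySem.List.foldl_congr_mem _ _ _ _ (fun acc k hk => h acc k (List.mem_range.mp hk))

theorem pv_A_eq_rot (a : List (List Int)) (h : Pre_matrix_rotate_right a) :
    matrix_rotate_right a = pvRot a := by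
  obtain ⟨hne, -⟩ := h
  have hget0 : PySem.List.pyGetD a 0 [] = a.headD [] := by
    cases a with
    | nil => exact absurd rfl hne
    | cons h t => simp [PySem.List.pyGetD_zero_cons]
  simp only [matrix_rotate_right, hget0]
  have hz : (PySem.List.pyRange 0 ((a.length : Nat) : Int) 1).foldl
      (fun r _ => r ++ [(0 : Int)]) [] = List.replicate a.length (0 : Int) := by
    rw [pv_key a.length _ (fun r _ => r ++ [(0 : Int)]) [] (fun _ _ _ => rfl)]
    rw [PySem.List.foldl_append_singleton_eq_map (fun _ => (0 : Int))]
    simp [List.map_const']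
  rw [hz]
  have hz2 : (PySem.List.pyRange 0 (((a.headD []).length : Nat) : Int) 1).foldl
      (fun b _ => b ++ [List.replicate a.length (0 : Int)]) [] =
      List.replicate (a.headD []).length (List.replicate a.length (0 : Int)) := by
    rw [pv_key (a.headD []).length _ (fun b _ => b ++ [List.replicate a.length (0 : Int)]) []
          (fun _ _ _ => rfl)]
    rw [PySem.List.foldl_append_singleton_eq_map (fun _ => List.replicate a.length (0 : Int))]
    simp [List.map_const']
  rw [hz2]
  rw [pv_key a.length _
        (fun b i => (List.range (a.headD []).length).foldl (fun b x =>
          b.modify x (fun r => r.set (a.length - 1 - i) ((a.getD i []).getD x 0))) b)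
        (List.replicate (a.headD []).length (List.replicate a.length (0 : Int)))
        ?_]
  · rw [pv_outer_inv a (a.headD []).length a.length]
    unfold pvRot
    simp only [pv_colfold_eq]
  · intro b i hi
    rw [pv_key (a.headD []).length _
          (fun b x => b.modify x (fun r =>
            r.set (a.length - 1 - i) ((a.getD i []).getD x 0))) b ?_]
    intro b2 x hx
    have e1 : ((0 : Int) + (x : Int)).toNat = x := by omega
    have e2 : (((a.length : Nat) : Int) - ((0 : Int) + (i : Int)) - 1).toNat = a.length - 1 - i := by
      omega
    have e3 : PySem.List.pyGetD a ((0 : Int) + (i : Int)) [] = a.getD i [] := by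
      rw [show ((0 : Int) + (i : Int)) = ((i : Nat) : Int) by ring, PySem.List.pyGetD_natCast]
    have e4 : ∀ (r : List Int), PySem.List.pyGetD r ((0 : Int) + (x : Int)) 0 = r.getD x 0 := by
      intro r
      rw [show ((0 : Int) + (x : Int)) = ((x : Nat) : Int) by ring, PySem.List.pyGetD_natCast]
    simp only [e1, e2, e3, e4]

-- ---- B-side: the fold prepends each row as a new first column ----

theorem pv_fold_cols (c : Nat) :
    ∀ (m : List (List Int)) (b0 : List (List Int)),
      (∀ r ∈ m, c ≤ r.length) → b0.length = c →
      m.foldl (fun b r => (r.zip b).map (fun p => p.1 :: p.2)) b0 =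
        (List.range c).map (fun x => m.reverse.map (fun r => r.getD x 0) ++ b0.getD x []) := by
  intro m
  induction m with
  | nil =>
    intro b0 _ hlen
    apply List.ext_getElem?
    intro k
    simp only [List.foldl_nil, List.getElem?_map]
    by_cases hk : k < c
    · rw [List.getElem?_range (by omega)]
      simp only [Option.map_some, List.reverse_nil, List.map_nil, List.nil_append]
      rw [List.getElem?_eq_getElem (by omega : k < b0.length)]
      rw [List.getD_eq_getElem b0 [] (by omega)]
    · rw [List.getElem?_eq_none (by omega : b0.length ≤ k),
        List.getElem?_eq_none (by simp only [List.length_range]; omega)]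
      simp
  | cons r rest ih =>
    intro b0 hall hlen
    rw [List.foldl_cons]
    have hrlen : c ≤ r.length := hall r List.mem_cons_self
    have hlen1 : ((r.zip b0).map (fun p => p.1 :: p.2)).length = c := by
      simp [List.length_zip]; omega
    rw [ih ((r.zip b0).map (fun p => p.1 :: p.2))
          (fun s hs => hall s (List.mem_cons_of_mem _ hs)) hlen1]
    apply List.map_congr_left
    intro x hx
    have hxc : x < c := List.mem_range.mp hx
    have hget : ((r.zip b0).map (fun p => p.1 :: p.2)).getD x [] =
        r.getD x 0 :: b0.getD x [] := by
      have hxz : x < (r.zip b0).length := by simp [List.length_zip]; omega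
      rw [List.getD_eq_getElem _ [] (by simpa using hxz)]
      simp only [List.getElem_map, List.getElem_zip]
      rw [List.getD_eq_getElem r 0 (by omega), List.getD_eq_getElem b0 [] (by omega)]
    rw [hget, List.reverse_cons, List.map_append, List.map_cons, List.map_nil,
      List.append_assoc, List.singleton_append]

theorem pv_B_eq_rot (a : List (List Int)) (h : Pre_matrix_rotate_right a) :
    matrix_rotate_right_alt a = pvRot a := by
  obtain ⟨hne, hall⟩ := h
  have hget0 : PySem.List.pyGetD a 0 [] = a.headD [] := by
    cases a with
    | nil => exact absurd rfl hne
    | cons h t => simp [PySem.List.pyGetD_zero_cons]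
  unfold matrix_rotate_right_alt
  simp only [hget0]
  rw [pv_fold_cols (a.headD []).length a ((a.headD []).map (fun _ => [])) hall (by simp)]
  unfold pvRot
  apply List.map_congr_left
  intro x _
  rw [List.append_right_eq_self.mpr]
  · apply List.ext_getElem?
    intro j
    rw [List.getElem?_map, List.getElem?_map]
    by_cases hj : j < a.length
    · rw [List.getElem?_eq_getElem (by simpa using hj),
        List.getElem?_eq_getElem (by simpa using hj)]
      simp only [Option.map_some, Option.some.injEq, List.getElem_reverse, List.getElem_range]
      rw [List.getD_eq_getElem a [] (by omega)]
    · rw [List.getElem?_eq_none (by simpa using hj), List.getElem?_eq_none (by simpa using hj)]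
      rfl
  · simp only [List.getD_eq_getElem?_getD, List.getElem?_map]
    cases h : (a.headD [])[x]? <;> simp [h]

-- ===== VERDICT (by name: the statement is the Claim_ definition above) =====
theorem matrix_rotate_right_spec : Claim_equal_matrix_rotate_right := by
  intro a _ hpre
  unfold Spec_matrix_rotate_right
  rw [pv_A_eq_rot a hpre, pv_B_eq_rot a hpre]
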